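-- pv_equiv track=rewrite | github.com/kimgyuhee/Python | Chapter0_Algorithm/2304/230405/test03.py | solution
-- ===== SOURCE A (Python) =====
-- def solution(n, v, A, B, C):
--
--     # 최소값만 곱했을 때 v 보다 크다면 -1리턴
--     multiply = min(A)*min(B)*min(C)
--     if multiply > v :
--         return -1
--
--     result = []
--     for i in range(n) :
--         for j in range(n) :
--             for k in range(n) :
--                 value = A[i]*B[j]*C[k]
--                 result.append(value)
--
--     result = set(result) # 중복제거
--     answer = list(result)
--
--     if v in answer :
--         return v
--     else :
--         answer.append(v)
--         answer.sort()
--         findIndex = answer.index(v)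
--         if findIndex == 0 :
--             return answer[findIndex]
--         return answer[findIndex-1]
-- ===== SOURCE B (Python) =====
-- def solution(n, v, A, B, C):
--     # Same contract as the original: -1 when min(A)*min(B)*min(C) > v;
--     # otherwise the largest product A[i]*B[j]*C[k] (i,j,k < n) not exceeding v,
--     # or v itself when no product is <= v.
--     if min(A) * min(B) * min(C) > v:
--         return -1
--     m = n if n > 0 else 0
--     pairs = [a * b for a in A[:m] for b in B[:m]]
--     Cm = C[:m]
--     best = None
--     for ab in pairs:
--         for c in Cm:
--             p = ab * c
--             if p <= v and (best is None or best < p):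
--                 best = p
--     return v if best is None else best
-- ===== Notes on version B (the rewrite author's own statement) =====
-- stated objective: alternative
-- what changed: A materializes all n^3 triple products, deduplicates them through a set, appends v, sorts, and index-scans for v's predecessor; B keeps a single running maximum of the products not exceeding v while enumerating precomputed pairwise products times C, with no intermediate product list, no set and no sort.
import Mathlib
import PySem

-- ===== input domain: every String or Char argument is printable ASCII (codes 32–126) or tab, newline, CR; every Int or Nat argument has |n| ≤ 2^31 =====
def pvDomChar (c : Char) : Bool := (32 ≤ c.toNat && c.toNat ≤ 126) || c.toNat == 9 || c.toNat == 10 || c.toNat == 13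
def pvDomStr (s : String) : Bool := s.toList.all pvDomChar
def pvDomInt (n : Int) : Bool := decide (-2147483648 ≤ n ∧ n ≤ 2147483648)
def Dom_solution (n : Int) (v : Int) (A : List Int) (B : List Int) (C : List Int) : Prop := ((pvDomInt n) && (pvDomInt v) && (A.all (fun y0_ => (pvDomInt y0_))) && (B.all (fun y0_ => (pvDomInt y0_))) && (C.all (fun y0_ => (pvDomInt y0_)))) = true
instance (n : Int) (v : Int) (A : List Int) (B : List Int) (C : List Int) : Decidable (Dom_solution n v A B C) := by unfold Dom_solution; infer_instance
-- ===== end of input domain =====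

-- B replaces A's materialize-all-products / dedupe / sort / index-scan pipeline by a single
-- running-maximum pass over the pairwise products times C (no intermediate product list, set or sort).

-- ===== PORT A =====
def solution (n : Int) (v : Int) (A : List Int) (B : List Int) (C : List Int) : Int :=
  let multiply := ((PySem.List.min? A (fun x => x)).getD 0) * ((PySem.List.min? B (fun x => x)).getD 0) * ((PySem.List.min? C (fun x => x)).getD 0)
  if multiply > v then -1
  else
    let result : List Int :=
      (PySem.List.pyRange 0 n).foldl (fun acc i =>
        (PySem.List.pyRange 0 n).foldl (fun acc j =>
          (PySem.List.pyRange 0 n).foldl (fun acc k =>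
            acc ++ [PySem.List.pyGetD A i 0 * PySem.List.pyGetD B j 0 * PySem.List.pyGetD C k 0]) acc) acc) []
    let answer : List Int := PySem.Set.ofList result
    if v ∈ answer then v
    else
      let answer2 := PySem.List.sorted (answer ++ [v]) (fun x => x) false
      let findIndex : Nat := (PySem.List.index? answer2 v).getD 0
      if findIndex = 0 then PySem.List.pyGetD answer2 (findIndex : Int) 0
      else PySem.List.pyGetD answer2 ((findIndex : Int) - 1) 0

-- ===== PORT B =====
def solution_alt (n : Int) (v : Int) (A : List Int) (B : List Int) (C : List Int) : Int :=
  if ((PySem.List.min? A (fun x => x)).getD 0) * ((PySem.List.min? B (fun x => x)).getD 0) * ((PySem.List.min? C (fun x => x)).getD 0) > v then -1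
  else
    let m : Int := if n > 0 then n else 0
    let pairs : List Int :=
      (PySem.List.slice A none (some m)).foldl
        (fun acc a => acc ++ (PySem.List.slice B none (some m)).map (fun b => a * b)) []
    let Cm : List Int := PySem.List.slice C none (some m)
    let best : Option Int :=
      pairs.foldl (fun best ab =>
        Cm.foldl (fun best c =>
          let p := ab * c
          if p ≤ v ∧ (best = none ∨ best.getD 0 < p) then some p else best) best) none
    match best with
    | none => v
    | some b => b

-- ===== PRECONDITION & SPEC =====
-- Pre_ excludes exactly the inputs on which the Python A raises: an empty list (min([]) is a
-- ValueError), or n larger than a list's length (A[i] is an IndexError) unless the min-product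
-- guard already returned -1 before the loops run.
def Pre_solution (n : Int) (v : Int) (A : List Int) (B : List Int) (C : List Int) : Prop :=
  A ≠ [] ∧ B ≠ [] ∧ C ≠ [] ∧
    (v < ((PySem.List.min? A (fun x => x)).getD 0) * ((PySem.List.min? B (fun x => x)).getD 0) * ((PySem.List.min? C (fun x => x)).getD 0) ∨
      (n ≤ (A.length : Int) ∧ n ≤ (B.length : Int) ∧ n ≤ (C.length : Int)))
instance (n : Int) (v : Int) (A : List Int) (B : List Int) (C : List Int) : Decidable (Pre_solution n v A B C) := by unfold Pre_solution; infer_instance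
def pvWitness_solution : Int × Int × List Int × List Int × List Int := (2, 10, [1, 2], [1, 3], [2, 4])

def Spec_solution (n : Int) (v : Int) (A : List Int) (B : List Int) (C : List Int) (out : Int) : Prop := out = solution_alt n v A B C
instance (n : Int) (v : Int) (A : List Int) (B : List Int) (C : List Int) (out : Int) : Decidable (Spec_solution n v A B C out) := by unfold Spec_solution; infer_instance

-- ===== CLAIM (what is proved, stated in full; the proofs are below) =====
def Claim_equal_solution : Prop := ∀ (n : Int) (v : Int) (A : List Int) (B : List Int) (C : List Int), Dom_solution n v A B C → Pre_solution n v A B C → Spec_solution n v A B C (solution n v A B C)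

-- ===== LEMMAS AND PROOFS =====

-- the accumulator step of B's running maximum
def pvStep (v : Int) (b : Option Int) (p : Int) : Option Int :=
  if p ≤ v ∧ (b = none ∨ b.getD 0 < p) then some p else b

-- "o is the maximum element of S not exceeding v (none if there is none)"
def pvGoodOn (v : Int) (S : List Int) : Option Int → Prop
  | none => ∀ p ∈ S, v < p
  | some m => m ∈ S ∧ m ≤ v ∧ ∀ p ∈ S, p ≤ v → p ≤ m

lemma pvStep_good (v p : Int) (S : List Int) (b : Option Int) (h : pvGoodOn v S b) :
    pvGoodOn v (S ++ [p]) (pvStep v b p) := by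
  cases b with
  | none =>
    have h' : ∀ q ∈ S, v < q := h
    unfold pvStep
    by_cases hp : p ≤ v
    · rw [if_pos ⟨hp, Or.inl rfl⟩]
      refine ⟨by simp, hp, ?_⟩
      intro q hq hqv
      rcases List.mem_append.1 hq with hq | hq
      · exact absurd hqv (not_le.2 (h' q hq))
      · simp at hq; omega
    · rw [if_neg (fun hc => hp hc.1)]
      intro q hq
      rcases List.mem_append.1 hq with hq | hq
      · exact h' q hq
      · simp at hq; omega
  | some m =>
    obtain ⟨hm, hmv, hmax⟩ := h
    unfold pvStep
    by_cases hc : p ≤ v ∧ m < p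
    · rw [if_pos ⟨hc.1, Or.inr (by simpa using hc.2)⟩]
      refine ⟨by simp, hc.1, ?_⟩
      intro q hq hqv
      rcases List.mem_append.1 hq with hq | hq
      · have := hmax q hq hqv; omega
      · simp at hq; omega
    · have hneg : ¬(p ≤ v ∧ ((some m : Option Int) = none ∨ (some m).getD 0 < p)) := by
        intro hcon
        rcases hcon.2 with h2 | h2
        · cases h2
        · exact hc ⟨hcon.1, by simpa using h2⟩
      rw [if_neg hneg]
      refine ⟨List.mem_append.2 (Or.inl hm), hmv, ?_⟩
      intro q hq hqv
      rcases List.mem_append.1 hq with hq | hq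
      · exact hmax q hq hqv
      · simp at hq; subst hq
        by_cases hmp : m < q
        · exact absurd ⟨hqv, hmp⟩ hc
        · omega

lemma pvFoldl_good (v : Int) (P : List Int) : ∀ (S : List Int) (b : Option Int),
    pvGoodOn v S b → pvGoodOn v (S ++ P) (P.foldl (pvStep v) b) := by
  induction P with
  | nil => intro S b h; simpa using h
  | cons p P ih =>
    intro S b h
    have h1 := pvStep_good v p S b h
    have h2 := ih (S ++ [p]) (pvStep v b p) h1
    simpa using h2

lemma pvGood_unique (v : Int) (P : List Int) (o1 o2 : Option Int)
    (h1 : pvGoodOn v P o1) (h2 : pvGoodOn v P o2) : o1 = o2 := by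
  cases o1 with
  | none =>
    cases o2 with
    | none => rfl
    | some m =>
      have h1' : ∀ q ∈ P, v < q := h1
      obtain ⟨hm, hmv, _⟩ := h2
      exact absurd hmv (not_le.2 (h1' m hm))
  | some m =>
    cases o2 with
    | none =>
      have h2' : ∀ q ∈ P, v < q := h2
      obtain ⟨hm, hmv, _⟩ := h1
      exact absurd hmv (not_le.2 (h2' m hm))
    | some m' =>
      obtain ⟨hm, hmv, hmax⟩ := h1
      obtain ⟨hm', hmv', hmax'⟩ := h2
      have heq : m = m' := le_antisymm (hmax' m hm hmv) (hmax m' hm' hmv')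
      rw [heq]

-- range-indexed prefix read: [xs[i] for i in range(n)] = xs.take n.toNat  (n ≤ len xs)
lemma pvTake (xs : List Int) (n : Int) (hn : n ≤ (xs.length : Int)) :
    (PySem.List.pyRange 0 n).map (fun i => PySem.List.pyGetD xs i 0) = xs.take n.toNat := by
  rw [PySem.List.pyRange_one]
  rw [List.map_map]
  apply List.ext_getElem
  · simp; omega
  · intro k hk1 hk2
    simp only [List.getElem_map, List.getElem_range, Function.comp_apply, List.getElem_take]
    have hk : (k : Int) < xs.length := by
      simp at hk1; omega
    rw [zero_add, PySem.List.pyGetD_eq_getElem xs 0 (by positivity) hk]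
    simp

-- the list of products both programs enumerate (in the same order)
def pvProds (n : Int) (A B C : List Int) : List Int :=
  (A.take n.toNat).flatMap (fun a => (B.take n.toNat).flatMap (fun b => (C.take n.toNat).map (fun c => a * b * c)))

lemma pvResult_eq (n : Int) (A B C : List Int)
    (hA : n ≤ (A.length : Int)) (hB : n ≤ (B.length : Int)) (hC : n ≤ (C.length : Int)) :
    ((PySem.List.pyRange 0 n).foldl (fun acc i =>
        (PySem.List.pyRange 0 n).foldl (fun acc j =>
          (PySem.List.pyRange 0 n).foldl (fun acc k =>
            acc ++ [PySem.List.pyGetD A i 0 * PySem.List.pyGetD B j 0 * PySem.List.pyGetD C k 0]) acc) acc) [] : List Int)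
    = pvProds n A B C := by
  have e1 : ∀ (acc : List Int) (a b : Int),
      (PySem.List.pyRange 0 n).foldl (fun acc k => acc ++ [a * b * PySem.List.pyGetD C k 0]) acc
        = acc ++ (C.take n.toNat).map (fun c => a * b * c) := by
    intro acc a b
    rw [PySem.List.foldl_append_singleton_eq_map]
    rw [← pvTake C n hC, List.map_map]
    rfl
  have e2 : ∀ (acc : List Int) (a : Int),
      (PySem.List.pyRange 0 n).foldl (fun acc j =>
        (PySem.List.pyRange 0 n).foldl (fun acc k =>
          acc ++ [a * PySem.List.pyGetD B j 0 * PySem.List.pyGetD C k 0]) acc) acc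
        = acc ++ (B.take n.toNat).flatMap (fun b => (C.take n.toNat).map (fun c => a * b * c)) := by
    intro acc a
    have : (fun (acc : List Int) (j : Int) =>
        (PySem.List.pyRange 0 n).foldl (fun acc k =>
          acc ++ [a * PySem.List.pyGetD B j 0 * PySem.List.pyGetD C k 0]) acc)
      = fun acc j => acc ++ (C.take n.toNat).map (fun c => a * PySem.List.pyGetD B j 0 * c) := by
      funext acc j; exact e1 acc a (PySem.List.pyGetD B j 0)
    rw [this, PySem.List.foldl_append_eq_flatMap]
    congr 1
    rw [← pvTake B n hB, List.flatMap_map]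
  have e3 : (fun (acc : List Int) (i : Int) =>
      (PySem.List.pyRange 0 n).foldl (fun acc j =>
        (PySem.List.pyRange 0 n).foldl (fun acc k =>
          acc ++ [PySem.List.pyGetD A i 0 * PySem.List.pyGetD B j 0 * PySem.List.pyGetD C k 0]) acc) acc)
    = fun acc i => acc ++ (B.take n.toNat).flatMap (fun b => (C.take n.toNat).map (fun c => PySem.List.pyGetD A i 0 * b * c)) := by
    funext acc i; exact e2 acc (PySem.List.pyGetD A i 0)
  rw [e3, PySem.List.foldl_append_eq_flatMap]
  simp only [List.nil_append]
  rw [pvProds, ← pvTake A n hA, List.flatMap_map]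


-- B's nested running-maximum fold equals the pvStep-fold over the flat product list
lemma pvAlt_best_eq (t : Nat) (v : Int) (A B C : List Int) :
    (((A.take t).flatMap (fun a => (B.take t).map (fun b => a * b))).foldl
       (fun best ab => (C.take t).foldl (fun best c =>
          if ab * c ≤ v ∧ (best = none ∨ best.getD 0 < ab * c) then some (ab * c) else best) best) none)
    = ((A.take t).flatMap (fun a => (B.take t).flatMap (fun b => (C.take t).map (fun c => a * b * c)))).foldl (pvStep v) none := by
  have h1 : (fun (best : Option Int) (ab : Int) => (C.take t).foldl (fun best c =>
        if ab * c ≤ v ∧ (best = none ∨ best.getD 0 < ab * c) then some (ab * c) else best) best)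
      = fun best ab => ((C.take t).map (fun c => ab * c)).foldl (pvStep v) best := by
    funext best ab
    rw [List.foldl_map]
    rfl
  rw [h1, ← List.foldl_flatMap, List.flatMap_assoc]
  simp only [List.flatMap_map]

-- B's pairs comprehension, flattened
lemma pvPairs_eq (t : Nat) (A B : List Int) :
    ((A.take t).foldl (fun acc a => acc ++ (B.take t).map (fun b => a * b)) [] : List Int)
      = (A.take t).flatMap (fun a => (B.take t).map (fun b => a * b)) := by
  rw [PySem.List.foldl_append_eq_flatMap, List.nil_append]

-- the sorted/index tail of A computes the maximum product ≤ v (or v when there is none)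
lemma pvATail_eq (v : Int) (P : List Int) :
    (if v ∈ (PySem.Set.ofList P : List Int) then v
     else
       if ((PySem.List.index? (PySem.List.sorted ((PySem.Set.ofList P : List Int) ++ [v]) (fun x => x) false) v).getD 0) = 0
       then PySem.List.pyGetD (PySem.List.sorted ((PySem.Set.ofList P : List Int) ++ [v]) (fun x => x) false) ((((PySem.List.index? (PySem.List.sorted ((PySem.Set.ofList P : List Int) ++ [v]) (fun x => x) false) v).getD 0) : Nat) : Int) 0
       else PySem.List.pyGetD (PySem.List.sorted ((PySem.Set.ofList P : List Int) ++ [v]) (fun x => x) false) (((((PySem.List.index? (PySem.List.sorted ((PySem.Set.ofList P : List Int) ++ [v]) (fun x => x) false) v).getD 0) : Nat) : Int) - 1) 0)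
    = match P.foldl (pvStep v) none with
      | none => v
      | some b => b := by
  have hGood : pvGoodOn v P (P.foldl (pvStep v) none) := by
    have := pvFoldl_good v P [] none (by intro p hp; simp at hp)
    simpa using this
  by_cases hv : v ∈ (PySem.Set.ofList P : List Int)
  · rw [if_pos hv]
    have hvP : v ∈ P := (PySem.Set.mem_ofList P v).1 hv
    cases h : P.foldl (pvStep v) none with
    | none => rfl
    | some m =>
      rw [h] at hGood
      obtain ⟨hm, hmv, hmax⟩ := hGood
      have hvm := hmax v hvP le_rfl
      show v = m
      omega
  · rw [if_neg hv]
    set S : List Int := (PySem.Set.ofList P : List Int) with hS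
    set L : List Int := PySem.List.sorted (S ++ [v]) (fun x => x) false with hL
    have hperm : L.Perm (S ++ [v]) := PySem.List.sorted_perm _ _ _
    have hvL : v ∈ L := hperm.mem_iff.2 (by simp)
    have hnd : L.Nodup := hperm.nodup_iff.2 (by
      refine List.Nodup.append (PySem.Set.nodup_ofList P) (List.nodup_singleton v) ?_
      intro a haS hav
      simp at hav
      subst hav
      exact hv haS)
    have hpw : L.Pairwise (· ≤ ·) := PySem.List.sorted_pairwise (S ++ [v]) (fun x => x)
    have hpwg := List.pairwise_iff_getElem.1 hpw
    obtain ⟨i, hi⟩ := Option.isSome_iff_exists.1 ((PySem.List.index?_isSome_iff L v).2 hvL)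
    obtain ⟨hilen, hLi, hfirst⟩ := PySem.List.getElem_of_index?_eq_some hi
    have hmemL' : ∀ x ∈ S, x ∈ L := by
      intro x hx
      exact hperm.mem_iff.2 (by simp [hx])
    rw [hi]
    simp only [Option.getD_some]
    by_cases hi0 : i = 0
    · subst hi0
      rw [if_pos rfl]
      rw [show ((0 : Nat) : Int) = (0 : Int) from rfl]
      rw [PySem.List.pyGetD_eq_getElem L 0 le_rfl (by exact_mod_cast hilen)]
      simp only [Int.toNat_zero]
      rw [hLi]
      have hnone : P.foldl (pvStep v) none = none := by
        apply pvGood_unique v P _ none hGood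
        intro p hp
        have hpS : p ∈ S := hS ▸ (PySem.Set.mem_ofList P p).2 hp
        obtain ⟨j, hj, hLj⟩ := List.mem_iff_getElem.1 (hmemL' p hpS)
        have hpv : p ≠ v := by
          intro h; rw [h] at hpS; exact hv hpS
        have hj0 : j ≠ 0 := by
          intro h
          subst h
          exact hpv (by rw [← hLj]; exact hLi)
        have := hpwg 0 j hilen hj (Nat.pos_of_ne_zero hj0)
        rw [hLi, hLj] at this
        have : v ≤ p := this
        rcases lt_or_eq_of_le this with h | h
        · exact h
        · exact absurd h.symm hpv
      rw [hnone]
    · rw [if_neg hi0]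
      have hi1 : 1 ≤ i := Nat.one_le_iff_ne_zero.2 hi0
      have hcast : ((i : Nat) : Int) - 1 = ((i - 1 : Nat) : Int) := by omega
      rw [hcast]
      have hi1len : i - 1 < L.length := by omega
      rw [PySem.List.pyGetD_eq_getElem L 0 (by positivity) (by exact_mod_cast hi1len)]
      simp only [Int.toNat_natCast]
      have hLm : L[i-1]'hi1len ≠ v := hfirst (i - 1) (by omega)
      have hLmS : L[i-1]'hi1len ∈ S := by
        have hmem : L[i-1]'hi1len ∈ S ++ [v] := hperm.mem_iff.1 (List.getElem_mem hi1len)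
        rcases List.mem_append.1 hmem with h | h
        · exact h
        · simp at h; exact absurd h hLm
      have hLmP : L[i-1]'hi1len ∈ P := (PySem.Set.mem_ofList P _).1 (hS ▸ hLmS)
      have hLmv : L[i-1]'hi1len ≤ v := by
        have := hpwg (i - 1) i hi1len hilen (by omega)
        rw [hLi] at this
        exact this
      have hsome : P.foldl (pvStep v) none = some (L[i-1]'hi1len) := by
        apply pvGood_unique v P _ _ hGood
        refine ⟨hLmP, hLmv, ?_⟩
        intro p hp hpv
        have hpS : p ∈ S := hS ▸ (PySem.Set.mem_ofList P p).2 hp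
        obtain ⟨j, hj, hLj⟩ := List.mem_iff_getElem.1 (hmemL' p hpS)
        have hpnv : p ≠ v := by
          intro h; rw [h] at hpS; exact hv hpS
        rcases Nat.lt_or_ge j i with hlt | hge
        · rcases Nat.lt_or_ge j (i - 1) with h2 | h2
          · have := hpwg j (i - 1) hj hi1len h2
            rw [hLj] at this
            exact this
          · have : j = i - 1 := by omega
            subst this
            rw [← hLj]
        · have hji : j ≠ i := by
            intro h
            have hpveq : p = v := by
              rw [← hLj, ← hLi]
              simp [h]
            exact hpnv hpveq
          have hgt : i < j := by omega
          have := hpwg i j hilen hj hgt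
          rw [hLi, hLj] at this
          omega
      rw [hsome]

theorem pvMain (n : Int) (v : Int) (A B C : List Int)
    (hdis : v < ((PySem.List.min? A (fun x => x)).getD 0) * ((PySem.List.min? B (fun x => x)).getD 0) * ((PySem.List.min? C (fun x => x)).getD 0) ∨
      (n ≤ (A.length : Int) ∧ n ≤ (B.length : Int) ∧ n ≤ (C.length : Int))) :
    solution n v A B C = solution_alt n v A B C := by
  unfold solution solution_alt
  by_cases hg : ((PySem.List.min? A (fun x => x)).getD 0) * ((PySem.List.min? B (fun x => x)).getD 0) * ((PySem.List.min? C (fun x => x)).getD 0) > v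
  · rw [if_pos hg, if_pos hg]
  · obtain ⟨hnA, hnB, hnC⟩ : n ≤ (A.length : Int) ∧ n ≤ (B.length : Int) ∧ n ≤ (C.length : Int) := by
      rcases hdis with h | h
      · exact absurd h hg
      · exact h
    rw [if_neg hg, if_neg hg]
    have hm0 : (0 : Int) ≤ (if n > 0 then n else 0) := by split <;> omega
    have hmt : (if n > 0 then n else 0).toNat = n.toNat := by split <;> omega
    simp only [PySem.List.slice_to _ hm0, hmt]
    rw [pvResult_eq n A B C hnA hnB hnC]
    rw [pvPairs_eq, pvAlt_best_eq]
    rw [show ((A.take n.toNat).flatMap (fun a => (B.take n.toNat).flatMap (fun b => (C.take n.toNat).map (fun c => a * b * c)))) = pvProds n A B C from rfl]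
    exact pvATail_eq v (pvProds n A B C)

-- ===== VERDICT (by name: the statement is the Claim_ definition above) =====
theorem solution_spec : Claim_equal_solution := by
  intro n v A B C _ hpre
  exact pvMain n v A B C hpre.2.2.2
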